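-- pv_equiv track=rewrite | github.com/MaaGF1/ZIRC | src/demo/farm/resource/pick_and_train.py | get_skill_cost_between
-- ===== SOURCE A (Python) =====
-- SKILL_TRAIN_COST_TABLE = {
--     1: {"to": 2, "coin": "coin1", "amount": 100, "hours": 1},
--     2: {"to": 3, "coin": "coin1", "amount": 200, "hours": 2},
--     3: {"to": 4, "coin": "coin1", "amount": 300, "hours": 3},
--     4: {"to": 5, "coin": "coin2", "amount": 120, "hours": 4},
--     5: {"to": 6, "coin": "coin2", "amount": 200, "hours": 6},
--     6: {"to": 7, "coin": "coin2", "amount": 300, "hours": 9},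
--     7: {"to": 8, "coin": "coin2", "amount": 400, "hours": 12},
--     8: {"to": 9, "coin": "coin3", "amount": 200, "hours": 18},
--     9: {"to": 10, "coin": "coin3", "amount": 300, "hours": 24},
-- }
--
-- def int_safe(value, default=0):
--     try:
--         return int(value)
--     except Exception:
--         return default
--
-- def get_skill_cost_between(current_level, target_level):
--     current_level = int_safe(current_level, 1)
--     target_level = int_safe(target_level, 10)
--     target_level = max(2, min(10, target_level))
--
--     cost = {"coin1": 0, "coin2": 0, "coin3": 0, "hours": 0}
--     if current_level >= target_level:
--         return cost
--
--     for lv in range(current_level, target_level):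
--         row = SKILL_TRAIN_COST_TABLE.get(lv)
--         if not row:
--             continue
--         cost[row["coin"]] += int(row["amount"])
--         cost["hours"] += int(row["hours"])
--     return cost
-- ===== SOURCE B (Python) =====
-- def int_safe(value, default=0):
--     try:
--         return int(value)
--     except Exception:
--         return default
--
-- # (coin, amount, hours) for training from level 1+i to 2+i, i = 0..8
-- _ROWS = [
--     ("coin1", 100, 1), ("coin1", 200, 2), ("coin1", 300, 3),
--     ("coin2", 120, 4), ("coin2", 200, 6), ("coin2", 300, 9),
--     ("coin2", 400, 12), ("coin3", 200, 18), ("coin3", 300, 24),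
-- ]
--
-- # Built once at module load: PREFIX[i] = totals over the first i rows (levels 1..i).
-- PREFIX = [{"coin1": 0, "coin2": 0, "coin3": 0, "hours": 0}]
-- for _coin, _amount, _hours in _ROWS:
--     _d = dict(PREFIX[-1])
--     _d[_coin] += _amount
--     _d["hours"] += _hours
--     PREFIX.append(_d)
--
-- def get_skill_cost_between(current_level, target_level):
--     cur = int_safe(current_level, 1)
--     tgt = max(2, min(10, int_safe(target_level, 10)))
--     if cur >= tgt:
--         return {"coin1": 0, "coin2": 0, "coin3": 0, "hours": 0}
--     lo = max(cur, 1)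
--     p, q = PREFIX[lo - 1], PREFIX[tgt - 1]
--     return {k: q[k] - p[k] for k in ("coin1", "coin2", "coin3", "hours")}
-- ===== Notes on version B (the rewrite author's own statement) =====
-- stated objective: alternative
-- what changed: Replaces the per-call loop over levels (with a dict lookup and in-place accumulation per level) by a prefix-sum table built once at module load; each call is a constant-time difference of two precomputed cumulative rows.
import Mathlib
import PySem

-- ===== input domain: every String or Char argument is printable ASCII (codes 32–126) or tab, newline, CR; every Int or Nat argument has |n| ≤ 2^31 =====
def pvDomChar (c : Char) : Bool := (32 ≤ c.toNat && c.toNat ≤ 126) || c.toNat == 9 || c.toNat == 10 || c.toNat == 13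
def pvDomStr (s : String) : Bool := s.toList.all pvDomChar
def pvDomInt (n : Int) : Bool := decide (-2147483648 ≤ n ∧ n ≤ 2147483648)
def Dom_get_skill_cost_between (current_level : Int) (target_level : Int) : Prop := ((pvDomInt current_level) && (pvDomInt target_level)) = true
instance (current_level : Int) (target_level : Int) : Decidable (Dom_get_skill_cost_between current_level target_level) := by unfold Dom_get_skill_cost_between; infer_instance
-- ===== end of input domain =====

-- B replaces the per-call loop over levels by a prefix-sum table built once; the claim is exact equivalence.

-- ===== PORT A =====
-- SKILL_TRAIN_COST_TABLE, keeping only the fields the function reads: level ↦ (coin, amount, hours)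
def pvTable : PySem.Dict Int (String × Int × Int) := PySem.Dict.mk
  [(1, ("coin1", 100, 1)), (2, ("coin1", 200, 2)), (3, ("coin1", 300, 3)),
   (4, ("coin2", 120, 4)), (5, ("coin2", 200, 6)), (6, ("coin2", 300, 9)),
   (7, ("coin2", 400, 12)), (8, ("coin3", 200, 18)), (9, ("coin3", 300, 24))]

-- int_safe on an int argument is the identity (int(x) = x), so it is elided in both ports.
def get_skill_cost_between (current_level : Int) (target_level : Int) : List (String × Int) :=
  let target_level := max 2 (min 10 target_level)
  let cost : PySem.Dict String Int := PySem.Dict.mk [("coin1", 0), ("coin2", 0), ("coin3", 0), ("hours", 0)]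
  if current_level ≥ target_level then cost.items
  else
    ((PySem.List.pyRange current_level target_level 1).foldl (fun cost lv =>
      match pvTable.get? lv with
      | none => cost
      | some (coin, amount, hours) =>
          let cost := cost.modify coin 0 (· + amount)
          cost.modify "hours" 0 (· + hours)) cost).items

-- ===== PORT B =====
-- rows of Source B's _ROWS: (coin, amount, hours) for level 1+i -> 2+i
def pvRows : List (String × Int × Int) :=
  [("coin1", 100, 1), ("coin1", 200, 2), ("coin1", 300, 3),
   ("coin2", 120, 4), ("coin2", 200, 6), ("coin2", 300, 9),
   ("coin2", 400, 12), ("coin3", 200, 18), ("coin3", 300, 24)]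

-- module-load build loop of Source B: PREFIX[i] = totals over the first i rows
def pvPrefix : List (PySem.Dict String Int) :=
  pvRows.foldl (fun pref r =>
      let d := pref.getLastD PySem.Dict.empty
      let d := d.modify r.1 0 (· + r.2.1)
      let d := d.modify "hours" 0 (· + r.2.2)
      pref ++ [d])
    [PySem.Dict.mk [("coin1", 0), ("coin2", 0), ("coin3", 0), ("hours", 0)]]

def get_skill_cost_between_alt (current_level : Int) (target_level : Int) : List (String × Int) :=
  let tgt := max 2 (min 10 target_level)
  if current_level ≥ tgt then [("coin1", 0), ("coin2", 0), ("coin3", 0), ("hours", 0)]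
  else
    let lo := max current_level 1
    let p := PySem.List.pyGetD pvPrefix (lo - 1) PySem.Dict.empty
    let q := PySem.List.pyGetD pvPrefix (tgt - 1) PySem.Dict.empty
    ["coin1", "coin2", "coin3", "hours"].map (fun k => (k, q.getD k 0 - p.getD k 0))

-- ===== PRECONDITION & SPEC =====
def Spec_get_skill_cost_between (current_level : Int) (target_level : Int) (out : List (String × Int)) : Prop := out = get_skill_cost_between_alt current_level target_level
instance (current_level : Int) (target_level : Int) (out : List (String × Int)) : Decidable (Spec_get_skill_cost_between current_level target_level out) := by unfold Spec_get_skill_cost_between; infer_instance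

-- ===== CLAIM (what is proved, stated in full; the proofs are below) =====
def Claim_equal_get_skill_cost_between : Prop := ∀ (current_level : Int) (target_level : Int), Dom_get_skill_cost_between current_level target_level → Spec_get_skill_cost_between current_level target_level (get_skill_cost_between current_level target_level)

-- ===== LEMMAS AND PROOFS =====

-- A's loop body, named for the lemmas below.
def pvStepA (cost : PySem.Dict String Int) (lv : Int) : PySem.Dict String Int :=
  match pvTable.get? lv with
  | none => cost
  | some (coin, amount, hours) =>
      let cost := cost.modify coin 0 (· + amount)
      cost.modify "hours" 0 (· + hours)

lemma pvTable_get_neg (lv : Int) (h : lv < 1) : pvTable.get? lv = none := by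
  simp only [pvTable, PySem.Dict.get?_mk_cons]
  repeat rw [if_neg (by simp; omega)]
  rfl

lemma pvStepA_neg (cost : PySem.Dict String Int) (lv : Int) (h : lv < 1) :
    pvStepA cost lv = cost := by
  simp [pvStepA, pvTable_get_neg lv h]

-- pvPrefix evaluated once (its literal value), so the finite check below does not re-run the build fold per case
lemma pvPrefix_eq : pvPrefix = [PySem.Dict.mk [("coin1", 0), ("coin2", 0), ("coin3", 0), ("hours", 0)],
   PySem.Dict.mk [("coin1", 100), ("coin2", 0), ("coin3", 0), ("hours", 1)],
   PySem.Dict.mk [("coin1", 300), ("coin2", 0), ("coin3", 0), ("hours", 3)],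
   PySem.Dict.mk [("coin1", 600), ("coin2", 0), ("coin3", 0), ("hours", 6)],
   PySem.Dict.mk [("coin1", 600), ("coin2", 120), ("coin3", 0), ("hours", 10)],
   PySem.Dict.mk [("coin1", 600), ("coin2", 320), ("coin3", 0), ("hours", 16)],
   PySem.Dict.mk [("coin1", 600), ("coin2", 620), ("coin3", 0), ("hours", 25)],
   PySem.Dict.mk [("coin1", 600), ("coin2", 1020), ("coin3", 0), ("hours", 37)],
   PySem.Dict.mk [("coin1", 600), ("coin2", 1020), ("coin3", 200), ("hours", 55)],
   PySem.Dict.mk [("coin1", 600), ("coin2", 1020), ("coin3", 500), ("hours", 79)]] := by decide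

-- the core finite check: for lo ∈ [1, t), t ∈ [2, 10], A's fold equals B's prefix difference
lemma pvCore (lo t : Int) (h1 : 1 ≤ lo) (h2 : 2 ≤ t) (h3 : t ≤ 10) (h4 : lo < t) :
    ((PySem.List.pyRange lo t 1).foldl pvStepA
      (PySem.Dict.mk [("coin1", 0), ("coin2", 0), ("coin3", 0), ("hours", 0)])).items =
    (let p := PySem.List.pyGetD pvPrefix (lo - 1) PySem.Dict.empty
     let q := PySem.List.pyGetD pvPrefix (t - 1) PySem.Dict.empty
     ["coin1", "coin2", "coin3", "hours"].map (fun k => (k, q.getD k 0 - p.getD k 0))) := by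
  have h9 : lo ≤ 9 := by omega
  rw [pvPrefix_eq]
  interval_cases lo <;> interval_cases t <;> decide


-- the else branch of A, expressed with pvStepA, equals B's else branch
lemma pvMain (c tgt : Int) (h2 : 2 ≤ tgt) (h10 : tgt ≤ 10) (hlt : c < tgt) :
    ((PySem.List.pyRange c tgt 1).foldl pvStepA
      (PySem.Dict.mk [("coin1", 0), ("coin2", 0), ("coin3", 0), ("hours", 0)])).items =
    (let p := PySem.List.pyGetD pvPrefix (max c 1 - 1) PySem.Dict.empty
     let q := PySem.List.pyGetD pvPrefix (tgt - 1) PySem.Dict.empty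
     ["coin1", "coin2", "coin3", "hours"].map (fun k => (k, q.getD k 0 - p.getD k 0))) := by
  by_cases hc1 : 1 <= c
  · rw [show max c 1 - 1 = c - 1 by omega]
    exact pvCore c tgt hc1 h2 h10 hlt
  · rw [show max c 1 - 1 = (1:Int) - 1 by omega]
    rw [PySem.List.pyRange_one_append c 1 tgt (by omega) (by omega), List.foldl_append]
    rw [PySem.List.foldl_congr_mem (PySem.List.pyRange c 1 1) pvStepA (fun acc _ => acc) _
        (by intro acc x hx
            have := (PySem.List.mem_pyRange_one).1 hx
            exact pvStepA_neg acc x (by omega)),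
      PySem.List.foldl_ignore]
    exact pvCore 1 tgt (by omega) h2 h10 (by omega)

-- ===== VERDICT (by name: the statement is the Claim_ definition above) =====
theorem get_skill_cost_between_spec : Claim_equal_get_skill_cost_between := by
  intro c t _
  unfold Spec_get_skill_cost_between get_skill_cost_between get_skill_cost_between_alt
  set tgt := max 2 (min 10 t) with htgt
  have h2 : 2 <= tgt := le_max_left _ _
  have h10 : tgt <= 10 := by omega
  by_cases hge : c >= tgt
  · simp [hge]
  · simp only [if_neg hge]
    exact pvMain c tgt h2 h10 (by omega)
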